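/-
  FACTS ABOUT THE SHADOW LAYER AND THE HEAP THAT EVERY CLIENT OF THE HEAP NEEDS (program-independent; first written in the trees of
  giflib and lodepng, in the namespace `Asan` already: every lemma keeps its full name and statement). The contract-level facts
  (`LiveIn`, `HeapPre`, `ShadowPre`) are in ProgX/Spec/HeapLemmas.lean and ProgX/Base/Spec/Lemmas.lean.

  §1  THE WALKER'S SHADOW ADDRESSES
      shadowAddr_granule_add g k      shadowAddr (g + k) = UInt64.ofNat g + UInt64.ofNat (0xC00000 + k)   (`mov [r + 0xC00000 + k], imm`, r = g)
      shadowAddr_of_granule g         UInt64.ofNat g + 12582912 = shadowAddr g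
      fillMem_last                    fillMem mem g v (k + 1) = (fillMem mem g v k).write (shadowAddr (g + k)) v
  §2  WHERE THINGS ARE (numbers for `omega` / `u_omega`)
      Heap.next_push                  (H.push n c).next = H.next + 64 + c: THE rewrite rule that makes the next object's address linear
      HeapOK.fits_of_push             HeapOK (H.push n c) mem → H.Fits c: a segment that starts AFTER an allocation gets the room back
      Heap.Fits.next_le               H.Fits c → H.next + c + 32 ≤ H.limit (no `HeapOK` of that heap needed)
      Heap.Live.range                 0x800040 ≤ p ∧ p + n + 32 ≤ 0xC00000 for a live object `(p, n)` of the heap at 800000H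
      HeapOK.next_where               0x800040 ≤ H.next ∧ H.next ≤ 0xC00020 for the heap `[800000H, C00000H)`
  §3  THE SAME PLACE, LATER: `Heap.SameRegion`, `Heap.Grew`, `Heap.releaseAll`
      Heap.SameRegion H H'            H'.base = H.base ∧ H'.limit = H.limit (+ refl trans push release resize releaseAll)
      Heap.Grew H H'                  `H'` is `H` after allocations (and frees of objects allocated in between): every object of `H` is an
                                      object of `H'`, UNCHANGED; every other object of `H'` lies at or above `H.next` (+ refl trans push release_new)
      Heap.releaseAll H ps            `free` of every pointer of the list, in order (+ _nil _cons)
  §4  THE INVARIANTS THROUGH A FOOTPRINT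
      untouched_of_sameExcept         `ShadowUntouched` from a footprint whose windows all end at or below C00000H: no `v_untouched` needed
      ShadowInv.sameExcept_low        `ShadowInv` through a footprint below the shadow
      HeapInv.sameExcept_frames       every window inside the stack region `[700000H, 800000H)`: `HeapInv` is kept
      HeapInv.sameExcept_stack_live   `F` bytes of stack below `sp` and bytes of ONE live object (a callee's `w_same`, or `by u_same`)
  §5  A PROTECTED FRAME OVER THE HEAP'S INVARIANT
      HeapInv.prologue_ra             after the prologue (`ShadowInv.prologue_ra`, lifted to the heap's invariant)
      HeapInv.epilogue_ra             after the epilogue (`ShadowInv.epilogue_ra`, lifted)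
      ShadowInv.frames_above, HeapInv.frames_above      the callers' frames lie at or above the clean stack's end
  No `sorry`, no axiom, no `bv_decide`, no `native_decide`.
-/
import Asan.Heap
namespace Asan
open X86 X86.User

/-! ### §1 The walker's shadow addresses

  A shadow store of the instrumented code is `mov [r + 0xC00000 + k], imm` with the granule in `r`: the walker's address is
  `UInt64.ofNat g + (0xC00000 + k)`, the invariants speak of `shadowAddr (g + k)` (`storesMem`, `fillMem`,
  `ShadowInv.prologue_ra / epilogue_ra`). -/

/-- The shadow byte of granule `g + k`, as the word the walker computes for `[r + 0xC00000 + k]` with `r = g`. With it the walker's nest of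
shadow stores is `storesMem mem g F.prologue` / `F.epilogue`: `unfold storesMem <layout>; simp only [List.foldl_cons, List.foldl_nil,
shadowAddr_granule_add]; rfl`. -/
theorem shadowAddr_granule_add (g k : Nat) : shadowAddr (g + k) = UInt64.ofNat g + UInt64.ofNat (0xC00000 + k) := by
  unfold shadowAddr
  rw [← UInt64.ofNat_add]
  congr 1
  omega

/-- The address `g + C00000H` with the granule `g` in a register is the shadow address of granule `g`. -/
theorem shadowAddr_of_granule (g : Nat) : UInt64.ofNat g + 12582912 = shadowAddr g := by
  unfold shadowAddr
  rw [Nat.add_comm, UInt64.ofNat_add]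
  rfl

/-- `fillMem` with one more granule, the LAST store outermost (its definition has the first store innermost): the step of a loop that fills
in ascending order. -/
theorem fillMem_last (mem : Mem) (g : Nat) (v : Byte) (k : Nat) :
    fillMem mem g v (k + 1) = (fillMem mem g v k).write (shadowAddr (g + k)) v := by
  induction k generalizing mem g with
  | zero => rfl
  | succ k ih =>
    have e : g + (k + 1) = g + 1 + k := by omega
    rw [fillMem, ih, e]
    rfl

/-! ### §2 Where things are -/

/-- **Where the next object of a heap with one more object is**: `64 + c` bytes further (the chunk of the pushed object: its
capacity and two red zones). `omega` does not look into `H.next`: this is the rewrite rule. -/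
theorem Heap.next_push (H : Heap) (n c : Nat) : (H.push n c).next = H.next + 64 + c := by
  rw [Heap.next_def, Heap.next_def, Heap.push_base, Heap.push_used]
  omega

/-- **The heap had room for the object it has**: the invariant of `H.push n c` says the chunk of the new object ends inside the region. -/
theorem HeapOK.fits_of_push {H : Heap} {n c : Nat} {mem : Mem} (h : HeapOK (H.push n c) mem) : H.Fits c := by
  have hroom := h.room
  rw [Heap.push_base, Heap.push_used, Heap.push_limit] at hroom
  unfold Heap.Fits
  omega

/-- **Where a fitting object ends**: its chunk (capacity and right red zone) ends inside the region. -/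
theorem Heap.Fits.next_le {H : Heap} {c : Nat} (h : H.Fits c) : H.next + c + 32 ≤ H.limit := by
  unfold Heap.Fits at h
  rw [Heap.next_def]
  omega

/-- **Where a live object of the heap at 800000H lies**: at or above 800040H (behind the control cell and its own left red zone),
and it ends 32 bytes (its right red zone) below C00000H. With these two bounds in the context `u_omega` / `u_resolve` separate the
object from every stack slot (a load of the object's field AFTER a push resolves to the memory before the push), and
`(UInt64.ofNat p).toNat = p ≠ 0` prunes the `je` arm of `test rdi, rdi` on the pointer. -/
theorem Heap.Live.range {H : Heap} {mem : Mem} {p n : Nat} (hbase : H.base = 0x800000) (hok : HeapOK H mem)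
    (hl : H.Live p n) : 0x800040 ≤ p ∧ p + n + 32 ≤ 0xC00000 := by
  obtain ⟨c, hc⟩ := hl
  have hr := hok.obj_range hc
  have hi := (hok.obj_inside hc).2.2.1
  rw [hbase] at hr
  simp only at hr hi
  omega

/-- **Where the next object of the present heap lies**: inside the region `[800000H, C00000H)` with its left red zone. For a heap
that is not the entry's (`hbase`, `hlimit` from the assertion's `region`: `hat.region.1.trans henv.heap.base`). -/
theorem HeapOK.next_where {H : Heap} {mem : Mem} (hok : HeapOK H mem) (hbase : H.base = 0x800000)
    (hlimit : H.limit = 0xC00000) : 0x800040 ≤ H.next ∧ H.next ≤ 0xC00020 := by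
  have hroom := hok.room
  rw [hbase, hlimit] at hroom
  rw [Heap.next_def, hbase]
  omega

/-! ### §3 The same place, later -/

/-- **The heap of a post is at the place of the heap of the pre** (what `HeapPre.of_inv` asks to give `HeapPre` again). -/
def Heap.SameRegion (H H' : Heap) : Prop := H'.base = H.base ∧ H'.limit = H.limit

theorem Heap.SameRegion.refl (H : Heap) : SameRegion H H := ⟨rfl, rfl⟩

theorem Heap.SameRegion.trans {H H' H'' : Heap} (h1 : SameRegion H H') (h2 : SameRegion H' H'') : SameRegion H H'' :=
  ⟨h2.1.trans h1.1, h2.2.trans h1.2⟩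

theorem Heap.SameRegion.push (H : Heap) (n c : Nat) : SameRegion H (H.push n c) := ⟨rfl, rfl⟩

theorem Heap.SameRegion.release (H : Heap) (p : Nat) : SameRegion H (H.release p) := ⟨rfl, rfl⟩

theorem Heap.SameRegion.resize (H : Heap) (p m : Nat) : SameRegion H (H.resize p m) := ⟨rfl, rfl⟩

/-- **`H'` is `H` after some allocations** (and `free`s of objects allocated in between): the region is the same, every object of
`H` is in `H'` with the same size, capacity and state, every other object of `H'` lies at or above `H.next`, and the bump pointer
did not go back. -/
structure Heap.Grew (H H' : Heap) : Prop where
  region : SameRegion H H'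
  old : ∀ x, x ∈ H.objs → x ∈ H'.objs
  new : ∀ x, x ∈ H'.objs → x ∈ H.objs ∨ H.next ≤ x.base
  used : H.used ≤ H'.used

theorem Heap.Grew.refl (H : Heap) : H.Grew H :=
  ⟨SameRegion.refl H, fun _ h => h, fun _ h => Or.inl h, Nat.le_refl _⟩

theorem Heap.Grew.trans {H H' H'' : Heap} (h1 : H.Grew H') (h2 : H'.Grew H'') : H.Grew H'' := by
  refine ⟨h1.region.trans h2.region, fun x hx => h2.old x (h1.old x hx), ?_, Nat.le_trans h1.used h2.used⟩
  intro x hx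
  rcases h2.new x hx with hin | hge
  · exact h1.new x hin
  · right
    have e1 := h1.region.1
    have e2 := h1.used
    rw [Heap.next_def] at hge ⊢
    omega

/-- An allocation. -/
theorem Heap.Grew.push (H : Heap) (n c : Nat) : H.Grew (H.push n c) := by
  refine ⟨SameRegion.push H n c, ?_, ?_, ?_⟩
  · intro x hx
    rw [Heap.push_objs]
    exact List.mem_cons_of_mem _ hx
  · intro x hx
    rw [Heap.push_objs] at hx
    rcases List.mem_cons.mp hx with rfl | hin
    · exact Or.inr (Nat.le_refl _)
    · exact Or.inl hin
  · rw [Heap.push_used]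
    omega

/-- **`free` of an object allocated since `H` keeps `H.Grew`**: no object of `H` has the base `p` (never re-use:
`HeapOK.next_above`). -/
theorem Heap.Grew.release_new {H H' : Heap} {mem : Mem} (hg : H.Grew H') (hok : HeapOK H mem) {p : Nat} (hp : H.next ≤ p) :
    H.Grew (H'.release p) := by
  have hne : ∀ x, x ∈ H.objs → Heap.releaseObj p x = x := by
    intro x hx
    apply releaseObj_of_ne
    have := hok.next_above hx
    omega
  refine ⟨hg.region.trans (SameRegion.release H' p), ?_, ?_, ?_⟩
  · intro x hx
    rw [Heap.release_objs]
    apply List.mem_map.mpr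
    exact ⟨x, hg.old x hx, hne x hx⟩
  · intro y hy
    rw [Heap.release_objs] at hy
    obtain ⟨x, hx, e⟩ := List.mem_map.mp hy
    rcases hg.new x hx with hin | hge
    · left
      rw [← e, hne x hin]
      exact hin
    · right
      rw [← e, releaseObj_base]
      exact hge
  · rw [Heap.release_used]
    exact hg.used

/-- **`free` of every pointer of the list**, in order. -/
def Heap.releaseAll (H : Heap) (ps : List Nat) : Heap := ps.foldl Heap.release H

theorem Heap.releaseAll_nil (H : Heap) : H.releaseAll [] = H := rfl

theorem Heap.releaseAll_cons (H : Heap) (p : Nat) (ps : List Nat) :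
    H.releaseAll (p :: ps) = (H.release p).releaseAll ps := rfl

theorem Heap.SameRegion.releaseAll (H : Heap) (ps : List Nat) : SameRegion H (H.releaseAll ps) := by
  induction ps generalizing H with
  | nil => exact SameRegion.refl H
  | cons p ps ih =>
    rw [Heap.releaseAll_cons]
    exact (SameRegion.release H p).trans (ih (H.release p))

/-! ### §4 The invariants through a footprint -/

/-- **A footprint whose windows all end at or below C00000H writes no shadow byte.** (Stack windows, windows inside heap objects,
the control cell, a header: everything but a `shadowSpan`.) -/
theorem untouched_of_sameExcept {ws : List Span} {mem mem' : Mem} (hs : Mem.SameExcept ws mem mem')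
    (hw : ∀ w, w ∈ ws → w.hi ≤ 0xC00000) : ShadowUntouched mem mem' := by
  apply hs.eqOn
  intro w hin
  have hw' := hw w hin
  right
  exact hw'

/-- **The shadow layer through a footprint below the shadow** (your own stores since the cut, or a shadow-level callee's `w_same`:
stack windows, out-pointer windows, buffers): every window ends at or below C00000H. -/
theorem ShadowInv.sameExcept_low {others : List Obj} {frames : List (Nat × FrameLayout)} {top : Nat} {mem mem' : Mem}
    {ws : List Span} (hinv : ShadowInv others frames top mem) (hs : Mem.SameExcept ws mem mem')
    (hw : ∀ w, w ∈ ws → w.hi ≤ 0xC00000) : ShadowInv others frames top mem' :=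
  hinv.untouched (untouched_of_sameExcept hs hw)

/-- **THE HEAP'S INVARIANT THROUGH A FOOTPRINT INSIDE THE STACK REGION**: every window lies in `[700000H, 800000H)` — the
function's own stack, spills, the return addresses of calls, the window of an out-pointer (`InFrame.range'`), the locals of a
protected frame. Off the heap's region, off the shadow: no `v_untouched` is needed. `hs` by `rw [w_mem]; u_same` over the windows
the segment wrote, or a callee's `w_same`; `hw` per window (`simp only [List.mem_cons, List.mem_nil_iff, or_false] at hw`,
`rcases hw with rfl | rfl`, `simp only`, `omega`). -/
theorem HeapInv.sameExcept_frames {H : Heap} {rest : List Obj} {frames : List (Nat × FrameLayout)} {top : Nat}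
    {mem mem' : Mem} {ws : List Span} (hinv : HeapInv H rest frames top mem) (hs : Mem.SameExcept ws mem mem')
    (hw : ∀ w, w ∈ ws → 0x700000 ≤ w.lo ∧ w.hi ≤ 0x800000) : HeapInv H rest frames top mem' := by
  have hoff := hinv.heap.offStack
  have hroom := hinv.heap.room
  have hun : ShadowUntouched mem mem' := by
    apply untouched_of_sameExcept hs
    intro w hin
    have hw' := hw w hin
    omega
  refine hinv.sameExcept hun hs ?_
  intro w hin
  have hw' := hw w hin
  left
  omega

/-- **A callee that wrote its stack frame and bytes of ONE live object keeps the heap's invariant** (`memcpy` / `memset` into a live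
object): no shadow byte written; the footprint is `F` bytes of stack below `sp ≤ 800000H` and `[a, a + m)` inside the live object
`(p, n)`. -/
theorem HeapInv.sameExcept_stack_live {H : Heap} {rest : List Obj} {frames : List (Nat × FrameLayout)} {top : Nat} {mem mem' : Mem}
    {p n a m sp F : Nat} (h : HeapInv H rest frames top mem) (hbase : H.base = 0x800000) (hun : ShadowUntouched mem mem')
    (hsp : sp ≤ 0x800000) (hl : H.Live p n) (h1 : p ≤ a) (h2 : a + m ≤ p + n)
    (hs : Mem.SameExcept [⟨sp - F, sp⟩, ⟨a, a + m⟩] mem mem') :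
    HeapInv H rest frames top mem' := by
  obtain ⟨c, hlc⟩ := hl
  have hsc := h.heap.size_le_cap hlc
  simp only at hsc
  refine h.sameExcept hun hs ?_
  intro w hw
  rcases List.mem_cons.mp hw with rfl | hw
  · -- the stack window lies below the heap's region
    left
    left
    rw [hbase]
    exact hsp
  · -- the other window lies inside the object
    have e : w = ⟨a, a + m⟩ := List.mem_singleton.mp hw
    subst e
    right
    refine ⟨⟨p, n, c, .live⟩, hlc, h1, ?_⟩
    show a + m ≤ p + c
    omega

/-! ### §5 A protected frame over the heap's invariant -/

/-- **After the prologue of a protected function** entered with the return-address slot at `top` (the shadow layer's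
`ShadowInv.prologue_ra`, lifted to the heap's invariant: the prologue's stores go to the shadow of the stack). -/
theorem HeapInv.prologue_ra {H : Heap} {rest : List Obj} {frames : List (Nat × FrameLayout)} {top top' : Nat} {mem : Mem}
    (h : HeapInv H rest frames (top + 8) mem) {F : FrameLayout} (hF : F.OK) (hra : top % 8 = 0)
    (ht : top' ≤ top - F.raOff) (h8 : top' % 8 = 0) (hlo : 0x700000 ≤ top') :
    HeapInv H rest ((top - F.raOff, F) :: frames) top' (storesMem mem ((top - F.raOff) / 8) F.prologue) := by
  have hF' := hF
  obtain ⟨hs8, hpin, _, _, _, _, _, _, hr8, hrs⟩ := hF'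
  have hhi := h.shadow.stack.hi
  have hlim := h.heap.hi
  have hoff := h.heap.offStack
  have hg : (top - F.raOff) / 8 + F.size / 8 ≤ 0x200000 := by omega
  have hse := storesMem_sameExcept mem ((top - F.raOff) / 8) (F.size / 8) F.prologue hpin hg
  refine ⟨?_, h.shadow.prologue_ra hF hra ht h8 hlo, h.restOut, ?_⟩
  · apply h.heap.eqOn
    apply hse.eqOn
    intro w hw
    have e := List.mem_singleton.mp hw
    rw [e]
    simp only
    omega
  · intro g hg1 hg2 hfree
    rw [shadowOf_storesMem_other mem ((top - F.raOff) / 8) (F.size / 8) F.prologue hpin hg g (by omega) (by omega)]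
    exact h.poisoned g hg1 hg2 hfree

/-- **After the epilogue** (`ShadowInv.epilogue_ra`, lifted to the heap's invariant). -/
theorem HeapInv.epilogue_ra {H : Heap} {rest : List Obj} {frames : List (Nat × FrameLayout)} {top top' : Nat} {mem : Mem}
    {F : FrameLayout} (h : HeapInv H rest ((top - F.raOff, F) :: frames) top' mem) (hra : top % 8 = 0)
    (hhi : top + 8 ≤ 0x800000) (hfr : ∀ bF, bF ∈ frames → top + 8 ≤ bF.1) :
    HeapInv H rest frames (top + 8) (storesMem mem ((top - F.raOff) / 8) F.epilogue) := by
  have hact := h.shadow.stack.active (top - F.raOff, F) List.mem_cons_self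
  simp only at hact
  obtain ⟨hF, hb8, hb1, hb2, _⟩ := hact
  obtain ⟨hs8, _, hein, _, _, _, _, _, hr8, hrs⟩ := hF
  have hlo := h.shadow.stack.lo
  have hlim := h.heap.hi
  have hoff := h.heap.offStack
  have hg : (top - F.raOff) / 8 + F.size / 8 ≤ 0x200000 := by omega
  have hse := storesMem_sameExcept mem ((top - F.raOff) / 8) (F.size / 8) F.epilogue hein hg
  refine ⟨?_, h.shadow.epilogue_ra hra hhi hfr, h.restOut, ?_⟩
  · apply h.heap.eqOn
    apply hse.eqOn
    intro w hw
    have e := List.mem_singleton.mp hw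
    rw [e]
    simp only
    omega
  · intro g hg1 hg2 hfree
    rw [shadowOf_storesMem_other mem ((top - F.raOff) / 8) (F.size / 8) F.epilogue hein hg g (by omega) (by omega)]
    exact h.poisoned g hg1 hg2 hfree

/-- **The callers' protected frames lie at or above the clean stack's end** (the `hfr` of `after_epilogue_shadow`, from the ENTRY's
invariant: `top` there is the entry's `rsp + 8`). -/
theorem ShadowInv.frames_above {others : List Obj} {frames : List (Nat × FrameLayout)} {top : Nat} {mem : Mem}
    (h : ShadowInv others frames top mem) : ∀ bF, bF ∈ frames → top ≤ bF.1 := by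
  intro bF hbF
  obtain ⟨_, _, k3, _, _⟩ := h.stack.active bF hbF
  exact k3

/-- The same from the heap's invariant (the `hfr` of `after_epilogue_heap`). -/
theorem HeapInv.frames_above {H : Heap} {rest : List Obj} {frames : List (Nat × FrameLayout)} {top : Nat} {mem : Mem}
    (h : HeapInv H rest frames top mem) : ∀ bF, bF ∈ frames → top ≤ bF.1 :=
  h.shadow.frames_above

end Asan
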